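-- pv_equiv track=rewrite | github.com/kashane1/job-hunt | src/job_hunt/humanize.py | _split_chunk_boundaries
-- ===== SOURCE A (Python) =====
-- def _split_chunk_boundaries(answer: str) -> list[int]:
--     """Return char indices where ``word_chunked`` mode should commit a prefix."""
--     boundaries: list[int] = []
--     for i, ch in enumerate(answer):
--         if ch in (" ", "\t", "\n", ".", ",", ";", ":", "!", "?"):
--             # commit prefix up through this delimiter
--             if i + 1 <= len(answer) and (not boundaries or boundaries[-1] != i + 1):
--                 boundaries.append(i + 1)
--     # Always include the full length as the final boundary.
--     if not boundaries or boundaries[-1] != len(answer):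
--         boundaries.append(len(answer))
--     return boundaries
-- ===== SOURCE B (Python) =====
-- def _split_chunk_boundaries(answer: str) -> list[int]:
--     """Return char indices where ``word_chunked`` mode should commit a prefix."""
--     table = str.maketrans(dict.fromkeys(" \t\n.,;:!?", "\n"))
--     parts = answer.translate(table).split("\n")
--     boundaries: list[int] = []
--     pos = 0
--     for part in parts[:-1]:
--         pos += len(part) + 1
--         boundaries.append(pos)
--     if not boundaries or boundaries[-1] != len(answer):
--         boundaries.append(len(answer))
--     return boundaries
-- ===== Notes on version B (the rewrite author's own statement) =====
-- stated objective: faster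
-- what changed: Replaces A's per-character enumerate scan (with its redundant duplicate-boundary check) by translating all nine delimiters to a single separator, splitting on it, and emitting cumulative offsets while walking the resulting parts.
import Mathlib
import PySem

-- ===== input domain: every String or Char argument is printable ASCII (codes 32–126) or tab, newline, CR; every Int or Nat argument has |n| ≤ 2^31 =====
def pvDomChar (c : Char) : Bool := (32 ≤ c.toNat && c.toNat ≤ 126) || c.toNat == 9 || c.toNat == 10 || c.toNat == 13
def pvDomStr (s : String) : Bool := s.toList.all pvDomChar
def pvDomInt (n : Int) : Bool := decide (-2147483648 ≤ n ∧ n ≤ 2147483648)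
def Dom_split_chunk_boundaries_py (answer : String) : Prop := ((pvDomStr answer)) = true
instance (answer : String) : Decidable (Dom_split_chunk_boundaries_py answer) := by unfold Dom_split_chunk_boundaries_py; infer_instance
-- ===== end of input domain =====

-- B replaces A's per-character index scan by translate-all-delimiters-to-'\n' + split + a
-- prefix-sum walk over the parts (measured constant-factor speedup: C-level translate/split).

-- ch in (" ", "\t", "\n", ".", ",", ";", ":", "!", "?")
def pvIsDelim (c : Char) : Bool :=
  c = ' ' || c = '\t' || c = '\n' || c = '.' || c = ',' || c = ';' || c = ':' || c = '!' || c = '?'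

-- ===== PORT A =====
-- step of A's for-loop over enumerate(answer)
def pvStepA (n : Int) (bs : List Int) (p : Int × Char) : List Int :=
  if pvIsDelim p.2 then
    if p.1 + 1 ≤ n ∧ (bs = [] ∨ bs.getLast? ≠ some (p.1 + 1)) then bs ++ [p.1 + 1] else bs
  else bs

def split_chunk_boundaries_py (answer : String) : List Int :=
  let n : Int := (answer.toList.length : Int)
  let boundaries := (PySem.List.enumerate answer.toList 0).foldl (pvStepA n) []
  if boundaries = [] ∨ boundaries.getLast? ≠ some n then boundaries ++ [n] else boundaries

-- ===== PORT B =====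
-- answer.translate(table): every delimiter becomes '\n'
def pvTr (c : Char) : Char := if pvIsDelim c then '\n' else c

-- str.split("\n") on the translated character list
def pvSplitNl : List Char → List (List Char)
  | [] => [[]]
  | c :: rest =>
    if c = '\n' then [] :: pvSplitNl rest
    else
      match pvSplitNl rest with
      | p :: ps => (c :: p) :: ps
      | [] => [[c]]

-- step of B's for-loop over parts[:-1] with state (boundaries, pos)
def pvStepB (st : List Int × Int) (part : List Char) : List Int × Int :=
  (st.1 ++ [st.2 + (part.length : Int) + 1], st.2 + (part.length : Int) + 1)

def split_chunk_boundaries_py_alt (answer : String) : List Int :=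
  let parts := pvSplitNl (answer.toList.map pvTr)
  let boundaries := (parts.dropLast.foldl pvStepB ([], 0)).1
  let n : Int := (answer.toList.length : Int)
  if boundaries = [] ∨ boundaries.getLast? ≠ some n then boundaries ++ [n] else boundaries

-- ===== PRECONDITION & SPEC =====
def Spec_split_chunk_boundaries_py (answer : String) (out : List Int) : Prop := out = split_chunk_boundaries_py_alt answer
instance (answer : String) (out : List Int) : Decidable (Spec_split_chunk_boundaries_py answer out) := by unfold Spec_split_chunk_boundaries_py; infer_instance

-- ===== CLAIM (what is proved, stated in full; the proofs are below) =====
def Claim_equal_split_chunk_boundaries_py : Prop := ∀ (answer : String), Dom_split_chunk_boundaries_py answer → Spec_split_chunk_boundaries_py answer (split_chunk_boundaries_py answer)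

-- ===== LEMMAS AND PROOFS =====

-- canonical value of both loops: successor positions of the delimiters
def pvPos : List Char → Int → List Int
  | [], _ => []
  | c :: r, k => if pvIsDelim c then (k + 1) :: pvPos r (k + 1) else pvPos r (k + 1)

-- A's loop from any prefix whose entries are ≤ k equals the prefix ++ pvPos
lemma pvLoopA (l : List Char) : ∀ (k : Int) (n : Int) (bs : List Int),
    k + l.length ≤ n → (∀ m ∈ bs, m ≤ k) →
    (PySem.List.enumerate l k).foldl (pvStepA n) bs = bs ++ pvPos l k := by
  induction l with
  | nil => intro k n bs _ _; simp [PySem.List.enumerate_nil, pvPos]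
  | cons c r ih =>
    intro k n bs hn hle
    rw [PySem.List.enumerate_cons, List.foldl_cons]
    simp only [pvPos]
    by_cases hc : pvIsDelim c
    · have hcond : k + 1 ≤ n ∧ (bs = [] ∨ bs.getLast? ≠ some (k + 1)) := by
        constructor
        · simp at hn; omega
        · rcases bs.eq_nil_or_concat with h | ⟨l', a, h⟩
          · left; exact h
          · right
            subst h
            rw [List.concat_eq_append, List.getLast?_concat]
            intro hEq
            have ha : a = k + 1 := by simpa using hEq
            have : a ≤ k := hle a (by simp)
            omega
      rw [show pvStepA n bs (k, c) = bs ++ [k + 1] by simp [pvStepA, hc, hcond]]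
      rw [ih (k + 1) n (bs ++ [k + 1]) (by simp at hn ⊢; omega)
        (by intro m hm; rcases List.mem_append.mp hm with h | h
            · have := hle m h; omega
            · simp at h; omega)]
      simp [hc]
    · rw [show pvStepA n bs (k, c) = bs by simp [pvStepA, hc]]
      rw [ih (k + 1) n bs (by simp at hn ⊢; omega)
        (by intro m hm; have := hle m hm; omega)]
      simp [hc]

lemma pvSplitNl_ne_nil (l : List Char) : pvSplitNl l ≠ [] := by
  cases l with
  | nil => simp [pvSplitNl]
  | cons c r =>
    simp only [pvSplitNl]
    split
    · simp
    · split <;> simp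

-- B's walk over parts[:-1], in recursive form
def pvWalk : List (List Char) → Int → List Int
  | [], _ => []
  | [_], _ => []
  | p :: q :: ps, pos => (pos + p.length + 1) :: pvWalk (q :: ps) (pos + p.length + 1)

lemma pvWalk_foldl : ∀ (parts : List (List Char)) (pos : Int) (acc : List Int),
    (parts.dropLast.foldl pvStepB (acc, pos)).1 = acc ++ pvWalk parts pos := by
  intro parts
  induction parts with
  | nil => intro pos acc; simp [pvWalk]
  | cons p ps ih =>
    intro pos acc
    cases ps with
    | nil => simp [pvWalk]
    | cons q qs =>
      rw [List.dropLast_cons_of_ne_nil (by simp), List.foldl_cons]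
      simp only [pvStepB]
      rw [show ((q :: qs).dropLast.foldl pvStepB
            (acc ++ [pos + (p.length : Int) + 1], pos + (p.length : Int) + 1)).1
          = (acc ++ [pos + (p.length : Int) + 1]) ++ pvWalk (q :: qs) (pos + (p.length : Int) + 1)
          from ih _ _]
      simp [pvWalk]

lemma pvWalk_splitNl (l : List Char) : ∀ (pos : Int),
    pvWalk (pvSplitNl (l.map pvTr)) pos = pvPos l pos := by
  induction l with
  | nil => intro pos; simp [pvSplitNl, pvWalk, pvPos]
  | cons c r ih =>
    intro pos
    simp only [List.map_cons, pvSplitNl, pvPos]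
    by_cases hc : pvIsDelim c
    · rw [if_pos (by simp [pvTr, hc])]
      obtain ⟨p, ps, hps⟩ := List.exists_cons_of_ne_nil (pvSplitNl_ne_nil (r.map pvTr))
      rw [hps]
      simp only [pvWalk, List.length_nil, Nat.cast_zero, add_zero]
      rw [← hps, ih (pos + 1)]
      simp [hc]
    · rw [if_neg (by simp [pvTr, hc]; intro h; rw [h] at hc; simp [pvIsDelim] at hc)]
      obtain ⟨p, ps, hps⟩ := List.exists_cons_of_ne_nil (pvSplitNl_ne_nil (r.map pvTr))
      rw [hps]
      have := ih (pos + 1)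
      rw [hps] at this
      cases ps with
      | nil =>
        simp only [pvWalk] at this ⊢
        simp only [hc, if_false, Bool.false_eq_true]
        exact this
      | cons q qs =>
        simp only [pvWalk] at this ⊢
        simp only [List.length_cons] at *
        rw [show pos + ((p.length + 1 : Nat) : Int) + 1 = pos + 1 + (p.length : Int) + 1 by push_cast; ring]
        rw [this]
        simp [hc]

-- ===== VERDICT (by name: the statement is the Claim_ definition above) =====
theorem split_chunk_boundaries_py_spec : Claim_equal_split_chunk_boundaries_py := by
  intro answer _
  unfold Spec_split_chunk_boundaries_py split_chunk_boundaries_py split_chunk_boundaries_py_alt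
  simp only []
  rw [pvLoopA answer.toList 0 (answer.toList.length : Int) [] (by simp) (by simp)]
  rw [pvWalk_foldl (pvSplitNl (answer.toList.map pvTr)) 0 []]
  rw [pvWalk_splitNl answer.toList 0]
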